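-- pv_equiv track=rewrite | github.com/DeaconSeals/GPacBase1b | fitness.py | repair_unreachable_cells
-- ===== SOURCE A (Python) =====
-- from collections import deque
--
-- def reachable_cells(maze, start):
-- 	'''Form a set of all reachable cells from a starting location using breadth-first graph search.
--
-- 	   Returns a set of reachable locations from the starting location.'''
-- 	directions = ((0,-1), (1,0), (0,1), (-1,0))
-- 	visited = {start}
-- 	frontier = deque()
-- 	frontier.append(start)
-- 	while frontier:
-- 		x_base, y_base = frontier.popleft()
-- 		for x_shift, y_shift in directions:
-- 			x, y = x_base+x_shift, y_base+y_shift
-- 			if 0 <= x < len(maze) and 0 <= y < len(maze[x]) and maze[x][y]==0 and (x,y) not in visited: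
-- 				frontier.append((x,y))
-- 				visited.add((x,y))
-- 	return visited
--
-- def repair_unreachable_cells(maze, start):
-- 	'''Make all unreachable cells walls so pills and fruit aren't erroneously spawned.
--
-- 	   Returns a modified map and the number of repairs performed.'''
-- 	repairs = 0
-- 	reachable = reachable_cells(maze, start)
-- 	for x in range(len(maze)):
-- 		for y in range(len(maze[x])):
-- 			if (x,y) not in reachable and maze[x][y] == 0:
-- 				maze[x][y] = 1
-- 				repairs += 1
-- 	return maze, repairs
-- ===== SOURCE B (Python) =====
-- def repair_unreachable_cells(maze, start):
-- 	'''Make all unreachable cells walls so pills and fruit aren't erroneously spawned.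
--
-- 	   Reachability is computed by iterative fixed-point sweeps over the grid
-- 	   (propagate "reachable" from any already-reachable neighbour until no sweep
-- 	   changes anything) instead of an explicit breadth-first search queue.
--
-- 	   Returns a modified map and the number of repairs performed.'''
-- 	reachable = {start}
-- 	changed = True
-- 	while changed:
-- 		changed = False
-- 		for x, row in enumerate(maze):
-- 			for y, cell in enumerate(row):
-- 				if cell == 0 and (x, y) not in reachable and (
-- 						(x - 1, y) in reachable or (x + 1, y) in reachable
-- 						or (x, y - 1) in reachable or (x, y + 1) in reachable):
-- 					reachable.add((x, y))
-- 					changed = True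
-- 	repairs = 0
-- 	for x in range(len(maze)):
-- 		for y in range(len(maze[x])):
-- 			if (x, y) not in reachable and maze[x][y] == 0:
-- 				maze[x][y] = 1
-- 				repairs += 1
-- 	return maze, repairs
-- ===== Notes on version B (the rewrite author's own statement) =====
-- stated objective: alternative
-- what changed: Replaces the deque-based breadth-first search of reachable_cells with an in-function iterative fixed-point computation: repeated whole-grid sweeps that mark any open cell adjacent to an already-marked cell, until a sweep changes nothing; the repair double loop then walls the unmarked open cells as before.
import Mathlib
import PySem

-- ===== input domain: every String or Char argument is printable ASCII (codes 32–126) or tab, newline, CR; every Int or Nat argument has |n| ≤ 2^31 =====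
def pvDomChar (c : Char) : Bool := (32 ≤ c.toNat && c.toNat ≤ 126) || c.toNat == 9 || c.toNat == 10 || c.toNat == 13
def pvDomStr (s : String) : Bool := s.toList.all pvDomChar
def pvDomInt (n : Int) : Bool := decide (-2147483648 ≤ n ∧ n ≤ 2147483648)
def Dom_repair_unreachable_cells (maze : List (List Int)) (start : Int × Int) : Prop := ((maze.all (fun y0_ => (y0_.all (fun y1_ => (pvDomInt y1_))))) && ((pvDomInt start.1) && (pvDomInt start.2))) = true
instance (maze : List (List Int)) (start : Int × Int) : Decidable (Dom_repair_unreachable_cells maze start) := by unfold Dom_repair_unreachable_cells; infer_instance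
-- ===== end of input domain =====

-- B replaces A's deque-based breadth-first search by iterative whole-grid fixed-point
-- sweeps (no queue); the repair double loop is unchanged. A mutates `maze` in place and
-- B performs the same in-place mutation; the equivalence proved here is about the
-- return value.

-- ===== PORT A =====

-- shared guard: `0 <= x < len(maze) and 0 <= y < len(maze[x]) and maze[x][y]==0`
-- (pyGetD defaults are only reached when an earlier conjunct is already false,
-- mirroring Python's short-circuit evaluation exactly)
def pvOpen (maze : List (List Int)) (x y : Int) : Bool :=
  decide (0 ≤ x) && decide (x < (maze.length : Int)) && decide (0 ≤ y) &&
  decide (y < ((PySem.List.pyGetD maze x []).length : Int)) &&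
  (PySem.List.pyGetD (PySem.List.pyGetD maze x []) y 0 == 0)

-- `directions = ((0,-1), (1,0), (0,1), (-1,0))`
def pvDirs : List (Int × Int) := [(0, -1), (1, 0), (0, 1), (-1, 0)]

-- termination-measure helpers: the grid's cells and the number of unvisited ones
def pvCells (maze : List (List Int)) : List (Int × Int) :=
  (PySem.List.enumerate maze 0).flatMap
    (fun p => (PySem.List.enumerate p.2 0).map (fun q => (p.1, q.1)))

def pvUnvis (maze : List (List Int)) (R : PySem.Set (Int × Int)) : Nat :=
  ((pvCells maze).filter (fun c => !(PySem.Set.contains R c))).length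

-- body of A's `for x_shift, y_shift in directions: …`
def pvStepA (maze : List (List Int)) (xb yb : Int)
    (st : List (Int × Int) × PySem.Set (Int × Int)) (d : Int × Int) :
    List (Int × Int) × PySem.Set (Int × Int) :=
  if pvOpen maze (xb + d.1) (yb + d.2) && !(PySem.Set.contains st.2 (xb + d.1, yb + d.2)) then
    (st.1 ++ [(xb + d.1, yb + d.2)], PySem.Set.add st.2 (xb + d.1, yb + d.2))
  else st

lemma pvUnvis_filter_sublist (maze : List (List Int)) (R : PySem.Set (Int × Int))
    (c : Int × Int) :
    ((pvCells maze).filter (fun d => !(PySem.Set.contains (PySem.Set.add R c) d))).Sublist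
      ((pvCells maze).filter (fun d => !(PySem.Set.contains R d))) := by
  apply List.monotone_filter_right
  intro d hd
  simp only [Bool.not_eq_eq_eq_not, Bool.not_true] at hd ⊢
  by_contra hcon
  have hdR : d ∈ R := (PySem.Set.contains_iff R d).mp (by
    cases h : PySem.Set.contains R d
    · exact absurd h hcon
    · rfl)
  have hmem : d ∈ PySem.Set.add R c := (PySem.Set.mem_add R c d).mpr (Or.inl hdR)
  rw [(PySem.Set.contains_iff _ d).mpr hmem] at hd
  cases hd

lemma pvUnvis_add_lt (maze : List (List Int)) (R : PySem.Set (Int × Int)) (c : Int × Int)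
    (hmem : c ∈ pvCells maze) (hnc : PySem.Set.contains R c = false) :
    pvUnvis maze (PySem.Set.add R c) < pvUnvis maze R := by
  have hsub := pvUnvis_filter_sublist maze R c
  have hin : c ∈ (pvCells maze).filter (fun d => !(PySem.Set.contains R d)) :=
    List.mem_filter.mpr ⟨hmem, by rw [hnc]; rfl⟩
  have hcc : PySem.Set.contains (PySem.Set.add R c) c = true :=
    (PySem.Set.contains_iff _ c).mpr ((PySem.Set.mem_add R c c).mpr (Or.inr rfl))
  have hout : c ∉ (pvCells maze).filter (fun d => !(PySem.Set.contains (PySem.Set.add R c) d)) := by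
    intro hmem2
    have h2 := (List.mem_filter.mp hmem2).2
    rw [hcc] at h2
    cases h2
  rcases Nat.lt_or_ge ((pvCells maze).filter (fun d => !(PySem.Set.contains (PySem.Set.add R c) d))).length
      ((pvCells maze).filter (fun d => !(PySem.Set.contains R d))).length with h | h
  · exact h
  · exact absurd (hsub.eq_of_length (le_antisymm hsub.length_le h)) (fun he => hout (he ▸ hin))

lemma pvOpen_mem_cells (maze : List (List Int)) (x y : Int) (h : pvOpen maze x y = true) :
    (x, y) ∈ pvCells maze := by
  simp only [pvOpen, Bool.and_eq_true, decide_eq_true_eq] at h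
  obtain ⟨⟨⟨⟨hx0, hxl⟩, hy0⟩, hyl⟩, -⟩ := h
  have hxn : x.toNat < maze.length := by omega
  have hrow : PySem.List.pyGetD maze x [] = maze[x.toNat] := by
    rw [PySem.List.pyGetD_of_nonneg _ _ hx0]
    exact List.getD_eq_getElem _ _ hxn
  rw [hrow] at hyl
  have hyn : y.toNat < maze[x.toNat].length := by omega
  have hxv : (x.toNat : Int) = x := Int.toNat_of_nonneg hx0
  have hyv : (y.toNat : Int) = y := Int.toNat_of_nonneg hy0
  simp only [pvCells, List.mem_flatMap]
  refine ⟨((x.toNat : Int), maze[x.toNat]), ?_, ?_⟩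
  · rw [PySem.List.mem_enumerate_iff]
    exact ⟨x.toNat, hxn, by rw [zero_add]⟩
  · simp only [List.mem_map]
    refine ⟨((y.toNat : Int), maze[x.toNat][y.toNat]), ?_, ?_⟩
    · rw [PySem.List.mem_enumerate_iff]
      exact ⟨y.toNat, hyn, by rw [zero_add]⟩
    · rw [hxv, hyv]

lemma pvStepA_meas (maze : List (List Int)) (xb yb : Int)
    (st : List (Int × Int) × PySem.Set (Int × Int)) (d : Int × Int) :
    (pvStepA maze xb yb st d).1.length + pvUnvis maze (pvStepA maze xb yb st d).2
      ≤ st.1.length + pvUnvis maze st.2 := by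
  unfold pvStepA
  split
  · rename_i hg
    simp only [Bool.and_eq_true, Bool.not_eq_eq_eq_not, Bool.not_true] at hg
    have hlt := pvUnvis_add_lt maze st.2 (xb + d.1, yb + d.2)
      (pvOpen_mem_cells maze _ _ hg.1) hg.2
    simp only [List.length_append, List.length_cons, List.length_nil]
    omega
  · exact le_rfl

lemma pvFoldA_meas (maze : List (List Int)) (xb yb : Int) (dirs : List (Int × Int))
    (st : List (Int × Int) × PySem.Set (Int × Int)) :
    (dirs.foldl (pvStepA maze xb yb) st).1.length
      + pvUnvis maze (dirs.foldl (pvStepA maze xb yb) st).2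
      ≤ st.1.length + pvUnvis maze st.2 := by
  induction dirs generalizing st with
  | nil => exact le_rfl
  | cons d dirs ih =>
    exact le_trans (ih (pvStepA maze xb yb st d)) (pvStepA_meas maze xb yb st d)

-- A's `while frontier:` loop
def pvBfs (maze : List (List Int)) (visited : PySem.Set (Int × Int))
    (frontier : List (Int × Int)) : PySem.Set (Int × Int) :=
  match frontier with
  | [] => visited
  | c :: rest =>
    let st := pvDirs.foldl (pvStepA maze c.1 c.2) (rest, visited)
    pvBfs maze st.2 st.1
termination_by pvUnvis maze visited + frontier.length
decreasing_by
  have h := pvFoldA_meas maze c.1 c.2 pvDirs (rest, visited)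
  simp only [List.length_cons]
  dsimp only at h
  omega

def pvReachableCells (maze : List (List Int)) (start : Int × Int) : PySem.Set (Int × Int) :=
  pvBfs maze (PySem.Set.add PySem.Set.empty start) [start]

-- the repair double loop, textually identical in A and in B (shared transliteration);
-- `maze[x][y] = 1` is the nested in-place assignment (indices are in range by the loop bounds)
def pvRepair (maze0 : List (List Int)) (reachable : PySem.Set (Int × Int)) :
    List (List Int) × Int :=
  (PySem.List.pyRange 0 (maze0.length : Int) 1).foldl (fun st x =>
    (PySem.List.pyRange 0 ((PySem.List.pyGetD st.1 x []).length : Int) 1).foldl (fun st2 y =>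
      if !(PySem.Set.contains reachable (x, y)) &&
          (PySem.List.pyGetD (PySem.List.pyGetD st2.1 x []) y 0 == 0) then
        (PySem.List.pySetD st2.1 x (PySem.List.pySetD (PySem.List.pyGetD st2.1 x []) y 1),
         st2.2 + 1)
      else st2) st)
    (maze0, (0 : Int))

def repair_unreachable_cells (maze : List (List Int)) (start : Int × Int) :
    List (List Int) × Int :=
  pvRepair maze (pvReachableCells maze start)

-- ===== PORT B =====

-- `(x-1,y) in reachable or (x+1,y) in reachable or (x,y-1) in reachable or (x,y+1) in reachable`
def pvNbr (R : PySem.Set (Int × Int)) (x y : Int) : Bool :=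
  PySem.Set.contains R (x - 1, y) || PySem.Set.contains R (x + 1, y) ||
  PySem.Set.contains R (x, y - 1) || PySem.Set.contains R (x, y + 1)

-- body of B's innermost loop
def pvSweepCell (st : PySem.Set (Int × Int) × Bool) (x y cell : Int) :
    PySem.Set (Int × Int) × Bool :=
  if cell == 0 && !(PySem.Set.contains st.1 (x, y)) && pvNbr st.1 x y then
    (PySem.Set.add st.1 (x, y), true)
  else st

-- one whole-grid sweep: `changed = False; for x, row in enumerate(maze): for y, cell in enumerate(row): …`
def pvSweep (maze : List (List Int)) (R : PySem.Set (Int × Int)) :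
    PySem.Set (Int × Int) × Bool :=
  (PySem.List.enumerate maze 0).foldl (fun st p =>
    (PySem.List.enumerate p.2 0).foldl (fun st2 q => pvSweepCell st2 p.1 q.1 q.2) st)
    (R, false)

-- generic fold preservation of a reflexive-transitive relation
lemma pvFoldlRel {α β : Type} (Q : β → β → Prop) (hr : ∀ a, Q a a)
    (ht : ∀ a b c, Q a b → Q b c → Q a c) (f : β → α → β) (l : List α)
    (h : ∀ b x, x ∈ l → Q b (f b x)) (init : β) : Q init (l.foldl f init) := by
  induction l generalizing init with
  | nil => exact hr init
  | cons x t ih =>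
    exact ht _ _ _ (h init x (List.mem_cons_self))
      (ih (fun b z hz => h b z (List.mem_cons_of_mem x hz)) (f init x))

lemma pvMemCellsOfEnum (maze : List (List Int)) (p : Int × List Int) (q : Int × Int)
    (hp : p ∈ PySem.List.enumerate maze 0) (hq : q ∈ PySem.List.enumerate p.2 0) :
    (p.1, q.1) ∈ pvCells maze := by
  simp only [pvCells, List.mem_flatMap]
  exact ⟨p, hp, List.mem_map.mpr ⟨q, hq, rfl⟩⟩

def pvQB (maze : List (List Int)) (a b : PySem.Set (Int × Int) × Bool) : Prop :=
  pvUnvis maze b.1 ≤ pvUnvis maze a.1 ∧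
    (b.2 = true → a.2 = true ∨ pvUnvis maze b.1 < pvUnvis maze a.1)

lemma pvQB_refl (maze : List (List Int)) (a : PySem.Set (Int × Int) × Bool) : pvQB maze a a :=
  ⟨le_rfl, fun h => Or.inl h⟩

lemma pvQB_trans (maze : List (List Int)) (a b c : PySem.Set (Int × Int) × Bool)
    (h1 : pvQB maze a b) (h2 : pvQB maze b c) : pvQB maze a c := by
  refine ⟨le_trans h2.1 h1.1, fun hc => ?_⟩
  rcases h2.2 hc with hb | hlt
  · rcases h1.2 hb with ha | hlt
    · exact Or.inl ha
    · exact Or.inr (lt_of_le_of_lt h2.1 hlt)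
  · exact Or.inr (lt_of_lt_of_le hlt h1.1)

lemma pvSweepCell_QB (maze : List (List Int)) (st : PySem.Set (Int × Int) × Bool)
    (x y cell : Int) (hmem : (x, y) ∈ pvCells maze) :
    pvQB maze st (pvSweepCell st x y cell) := by
  unfold pvSweepCell
  split
  · rename_i hg
    simp only [Bool.and_eq_true, Bool.not_eq_eq_eq_not, Bool.not_true] at hg
    have hlt := pvUnvis_add_lt maze st.1 (x, y) hmem hg.1.2
    exact ⟨le_of_lt hlt, fun _ => Or.inr hlt⟩
  · exact pvQB_refl maze st

lemma pvSweep_QB (maze : List (List Int)) (R : PySem.Set (Int × Int)) :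
    pvQB maze (R, false) (pvSweep maze R) := by
  unfold pvSweep
  refine pvFoldlRel (pvQB maze) (pvQB_refl maze) (pvQB_trans maze) _ _ ?_ (R, false)
  intro st p hp
  refine pvFoldlRel (pvQB maze) (pvQB_refl maze) (pvQB_trans maze) _ _ ?_ st
  intro st2 q hq
  exact pvSweepCell_QB maze st2 p.1 q.1 q.2 (pvMemCellsOfEnum maze p q hp hq)

lemma pvSweep_meas (maze : List (List Int)) (R : PySem.Set (Int × Int))
    (h : (pvSweep maze R).2 = true) :
    pvUnvis maze (pvSweep maze R).1 < pvUnvis maze R := by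
  have hq := pvSweep_QB maze R
  rcases hq.2 h with hfalse | hlt
  · cases hfalse
  · exact hlt

-- B's `while changed:` loop
def pvLoopB (maze : List (List Int)) (R : PySem.Set (Int × Int)) : PySem.Set (Int × Int) :=
  let st := pvSweep maze R
  if h : st.2 = true then pvLoopB maze st.1 else st.1
termination_by pvUnvis maze R
decreasing_by exact pvSweep_meas maze R h

def repair_unreachable_cells_alt (maze : List (List Int)) (start : Int × Int) :
    List (List Int) × Int :=
  pvRepair maze (pvLoopB maze (PySem.Set.add PySem.Set.empty start))

-- ===== PRECONDITION & SPEC =====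
def Spec_repair_unreachable_cells (maze : List (List Int)) (start : Int × Int) (out : List (List Int) × Int) : Prop := out = repair_unreachable_cells_alt maze start
instance (maze : List (List Int)) (start : Int × Int) (out : List (List Int) × Int) : Decidable (Spec_repair_unreachable_cells maze start out) := by unfold Spec_repair_unreachable_cells; infer_instance

-- ===== CLAIM (what is proved, stated in full; the proofs are below) =====
def Claim_equal_repair_unreachable_cells : Prop := ∀ (maze : List (List Int)) (start : Int × Int), Dom_repair_unreachable_cells maze start → Spec_repair_unreachable_cells maze start (repair_unreachable_cells maze start)

-- ===== LEMMAS AND PROOFS =====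

-- the reachability relation both searches compute: start itself, plus closure under
-- stepping to an in-bounds open neighbour
inductive pvReach (maze : List (List Int)) (s : Int × Int) : Int × Int → Prop where
  | start : pvReach maze s s
  | step (c d : Int × Int) : pvReach maze s c → d ∈ pvDirs →
      pvOpen maze (c.1 + d.1) (c.2 + d.2) = true → pvReach maze s (c.1 + d.1, c.2 + d.2)

-- ---- A side: the BFS visited set is exactly pvReach ----

lemma pvStepA_vis_mono (maze : List (List Int)) (xb yb : Int)
    (st : List (Int × Int) × PySem.Set (Int × Int)) (d : Int × Int) (e : Int × Int)
    (he : e ∈ st.2) : e ∈ (pvStepA maze xb yb st d).2 := by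
  unfold pvStepA
  split
  · exact (PySem.Set.mem_add _ _ _).mpr (Or.inl he)
  · exact he

lemma pvStepA_front_mono (maze : List (List Int)) (xb yb : Int)
    (st : List (Int × Int) × PySem.Set (Int × Int)) (d : Int × Int) (e : Int × Int)
    (he : e ∈ st.1) : e ∈ (pvStepA maze xb yb st d).1 := by
  unfold pvStepA
  split
  · exact List.mem_append_left _ he
  · exact he

lemma pvStepA_front_sub (maze : List (List Int)) (xb yb : Int)
    (st : List (Int × Int) × PySem.Set (Int × Int)) (d : Int × Int) (e : Int × Int)
    (he : e ∈ (pvStepA maze xb yb st d).1) : e ∈ st.1 ∨ e ∈ (pvStepA maze xb yb st d).2 := by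
  revert he
  unfold pvStepA
  split
  · intro he
    rcases List.mem_append.mp he with h | h
    · exact Or.inl h
    · rw [List.mem_singleton] at h
      subst h
      exact Or.inr ((PySem.Set.mem_add _ _ _).mpr (Or.inr rfl))
  · intro he
    exact Or.inl he

lemma pvStepA_vis_sub (maze : List (List Int)) (xb yb : Int)
    (st : List (Int × Int) × PySem.Set (Int × Int)) (d : Int × Int) (e : Int × Int)
    (he : e ∈ (pvStepA maze xb yb st d).2) :
    e ∈ st.2 ∨ (e = (xb + d.1, yb + d.2) ∧ pvOpen maze (xb + d.1) (yb + d.2) = true) := by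
  unfold pvStepA at he
  split at he
  · rename_i hg
    simp only [Bool.and_eq_true] at hg
    rcases (PySem.Set.mem_add _ _ _).mp he with h | h
    · exact Or.inl h
    · exact Or.inr ⟨h, hg.1⟩
  · exact Or.inl he

lemma pvStepA_vis_front (maze : List (List Int)) (xb yb : Int)
    (st : List (Int × Int) × PySem.Set (Int × Int)) (d : Int × Int) (e : Int × Int)
    (he : e ∈ (pvStepA maze xb yb st d).2) : e ∈ st.2 ∨ e ∈ (pvStepA maze xb yb st d).1 := by
  revert he
  unfold pvStepA
  split
  · intro he
    rcases (PySem.Set.mem_add _ _ _).mp he with h | h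
    · exact Or.inl h
    · subst h
      exact Or.inr (List.mem_append_right _ (List.mem_singleton.mpr rfl))
  · intro he
    exact Or.inl he

lemma pvStepA_good (maze : List (List Int)) (xb yb : Int)
    (st : List (Int × Int) × PySem.Set (Int × Int)) (d : Int × Int)
    (ho : pvOpen maze (xb + d.1) (yb + d.2) = true) :
    (xb + d.1, yb + d.2) ∈ (pvStepA maze xb yb st d).2 := by
  unfold pvStepA
  split
  · exact (PySem.Set.mem_add _ _ _).mpr (Or.inr rfl)
  · rename_i hg
    rw [ho, Bool.true_and, Bool.not_eq_eq_eq_not, Bool.not_true, Bool.not_eq_false] at hg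
    exact (PySem.Set.contains_iff _ _).mp hg

lemma pvFoldA_vis_mono (maze : List (List Int)) (xb yb : Int) (dirs : List (Int × Int))
    (st : List (Int × Int) × PySem.Set (Int × Int)) (e : Int × Int) (he : e ∈ st.2) :
    e ∈ (dirs.foldl (pvStepA maze xb yb) st).2 := by
  induction dirs generalizing st with
  | nil => exact he
  | cons d t ih => exact ih (pvStepA maze xb yb st d) (pvStepA_vis_mono maze xb yb st d e he)

lemma pvFoldA_front_mono (maze : List (List Int)) (xb yb : Int) (dirs : List (Int × Int))
    (st : List (Int × Int) × PySem.Set (Int × Int)) (e : Int × Int) (he : e ∈ st.1) :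
    e ∈ (dirs.foldl (pvStepA maze xb yb) st).1 := by
  induction dirs generalizing st with
  | nil => exact he
  | cons d t ih => exact ih (pvStepA maze xb yb st d) (pvStepA_front_mono maze xb yb st d e he)

lemma pvFoldA_front_sub (maze : List (List Int)) (xb yb : Int) (dirs : List (Int × Int))
    (st : List (Int × Int) × PySem.Set (Int × Int)) (e : Int × Int)
    (he : e ∈ (dirs.foldl (pvStepA maze xb yb) st).1) :
    e ∈ st.1 ∨ e ∈ (dirs.foldl (pvStepA maze xb yb) st).2 := by
  induction dirs generalizing st with
  | nil => exact Or.inl he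
  | cons d t ih =>
    rcases ih (pvStepA maze xb yb st d) he with h | h
    · rcases pvStepA_front_sub maze xb yb st d e h with h2 | h2
      · exact Or.inl h2
      · exact Or.inr (pvFoldA_vis_mono maze xb yb t _ e h2)
    · exact Or.inr h

lemma pvFoldA_vis_sub (maze : List (List Int)) (xb yb : Int) (dirs : List (Int × Int))
    (st : List (Int × Int) × PySem.Set (Int × Int)) (e : Int × Int)
    (he : e ∈ (dirs.foldl (pvStepA maze xb yb) st).2) :
    e ∈ st.2 ∨ ∃ d ∈ dirs, e = (xb + d.1, yb + d.2) ∧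
      pvOpen maze (xb + d.1) (yb + d.2) = true := by
  induction dirs generalizing st with
  | nil => exact Or.inl he
  | cons d t ih =>
    rcases ih (pvStepA maze xb yb st d) he with h | h
    · rcases pvStepA_vis_sub maze xb yb st d e h with h2 | h2
      · exact Or.inl h2
      · exact Or.inr ⟨d, List.mem_cons_self, h2⟩
    · obtain ⟨d', hd', h2⟩ := h
      exact Or.inr ⟨d', List.mem_cons_of_mem d hd', h2⟩

lemma pvFoldA_vis_front (maze : List (List Int)) (xb yb : Int) (dirs : List (Int × Int))
    (st : List (Int × Int) × PySem.Set (Int × Int)) (e : Int × Int)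
    (he : e ∈ (dirs.foldl (pvStepA maze xb yb) st).2) :
    e ∈ st.2 ∨ e ∈ (dirs.foldl (pvStepA maze xb yb) st).1 := by
  induction dirs generalizing st with
  | nil => exact Or.inl he
  | cons d t ih =>
    rcases ih (pvStepA maze xb yb st d) he with h | h
    · rcases pvStepA_vis_front maze xb yb st d e h with h2 | h2
      · exact Or.inl h2
      · exact Or.inr (pvFoldA_front_mono maze xb yb t _ e h2)
    · exact Or.inr h

lemma pvFoldA_good (maze : List (List Int)) (xb yb : Int) (dirs : List (Int × Int))
    (st : List (Int × Int) × PySem.Set (Int × Int)) (d : Int × Int) (hd : d ∈ dirs)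
    (ho : pvOpen maze (xb + d.1) (yb + d.2) = true) :
    (xb + d.1, yb + d.2) ∈ (dirs.foldl (pvStepA maze xb yb) st).2 := by
  induction dirs generalizing st with
  | nil => cases hd
  | cons d' t ih =>
    rcases List.mem_cons.mp hd with h | h
    · subst h
      exact pvFoldA_vis_mono maze xb yb t _ _ (pvStepA_good maze xb yb st d ho)
    · exact ih _ h

-- closure of a set of cells under stepping to open neighbours
def pvClosed (maze : List (List Int)) (R : List (Int × Int)) : Prop :=
  ∀ e ∈ R, ∀ d ∈ pvDirs, pvOpen maze (e.1 + d.1) (e.2 + d.2) = true →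
    (e.1 + d.1, e.2 + d.2) ∈ R

lemma pvBfs_mono (maze : List (List Int)) (visited : PySem.Set (Int × Int))
    (frontier : List (Int × Int)) (e : Int × Int) :
    e ∈ visited → e ∈ pvBfs maze visited frontier := by
  induction visited, frontier using pvBfs.induct maze with
  | case1 visited => intro he; rw [pvBfs]; exact he
  | case2 visited c rest st ih =>
    intro he
    rw [pvBfs]
    exact ih (pvFoldA_vis_mono maze c.1 c.2 pvDirs (rest, visited) e he)

lemma pvBfs_sound (maze : List (List Int)) (s : Int × Int) (visited : PySem.Set (Int × Int))
    (frontier : List (Int × Int)) :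
    (∀ e ∈ visited, pvReach maze s e) → (∀ e ∈ frontier, pvReach maze s e) →
    ∀ e ∈ pvBfs maze visited frontier, pvReach maze s e := by
  induction visited, frontier using pvBfs.induct maze with
  | case1 visited =>
    intro hv _ e he
    rw [pvBfs] at he
    exact hv e he
  | case2 visited c rest st ih =>
    intro hv hf e he
    rw [pvBfs] at he
    have hvis : ∀ e ∈ (pvDirs.foldl (pvStepA maze c.1 c.2) (rest, visited)).2,
        pvReach maze s e := by
      intro e' he'
      rcases pvFoldA_vis_sub maze c.1 c.2 pvDirs (rest, visited) e' he' with h | ⟨d, hd, heq, ho⟩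
      · exact hv e' h
      · subst heq
        exact pvReach.step c d (hf c List.mem_cons_self) hd ho
    refine ih hvis ?_ e he
    intro e' he'
    rcases pvFoldA_front_sub maze c.1 c.2 pvDirs (rest, visited) e' he' with h | h
    · exact hf e' (List.mem_cons_of_mem c h)
    · exact hvis e' h

lemma pvBfs_closed (maze : List (List Int)) (visited : PySem.Set (Int × Int))
    (frontier : List (Int × Int)) :
    (∀ e ∈ visited, e ∈ frontier ∨ ∀ d ∈ pvDirs,
        pvOpen maze (e.1 + d.1) (e.2 + d.2) = true → (e.1 + d.1, e.2 + d.2) ∈ visited) →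
    pvClosed maze (pvBfs maze visited frontier) := by
  induction visited, frontier using pvBfs.induct maze with
  | case1 visited =>
    intro hinv e he d hd ho
    rw [pvBfs] at he ⊢
    rcases hinv e he with h | h
    · cases h
    · exact h d hd ho
  | case2 visited c rest st ih =>
    intro hinv
    rw [pvBfs]
    refine ih ?_
    intro e he
    rcases pvFoldA_vis_front maze c.1 c.2 pvDirs (rest, visited) e he with hv | hfr
    · rcases hinv e hv with hold | hcl
      · rcases List.mem_cons.mp hold with hec | her
        · subst hec
          right
          intro d hd ho
          exact pvFoldA_good maze e.1 e.2 pvDirs (rest, visited) d hd ho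
        · exact Or.inl (pvFoldA_front_mono maze c.1 c.2 pvDirs (rest, visited) e her)
      · right
        intro d hd ho
        exact pvFoldA_vis_mono maze c.1 c.2 pvDirs (rest, visited) _ (hcl d hd ho)
    · exact Or.inl hfr

lemma pvStart_mem (s : Int × Int) : s ∈ PySem.Set.add PySem.Set.empty s :=
  (PySem.Set.mem_add _ _ _).mpr (Or.inr rfl)

lemma pvInit_mem (s e : Int × Int) (he : e ∈ PySem.Set.add PySem.Set.empty s) : e = s := by
  rcases (PySem.Set.mem_add _ _ _).mp he with h | h
  · cases h
  · exact h

lemma pvA_iff (maze : List (List Int)) (s e : Int × Int) :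
    e ∈ pvReachableCells maze s ↔ pvReach maze s e := by
  constructor
  · intro he
    refine pvBfs_sound maze s _ _ ?_ ?_ e he
    · intro e' he'
      rw [pvInit_mem s e' he']
      exact pvReach.start
    · intro e' he'
      rw [List.mem_singleton.mp he']
      exact pvReach.start
  · intro hr
    have hcl : pvClosed maze (pvReachableCells maze s) := by
      refine pvBfs_closed maze _ _ ?_
      intro e' he'
      exact Or.inl (by rw [pvInit_mem s e' he']; exact List.mem_singleton.mpr rfl)
    have hs : s ∈ pvReachableCells maze s := pvBfs_mono maze _ _ s (pvStart_mem s)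
    induction hr with
    | start => exact hs
    | step c d hc hd ho ihc => exact hcl c ihc d hd ho

-- ---- B side: the fixed-point sweep set is exactly pvReach ----

lemma pvEnumOpen (maze : List (List Int)) (p : Int × List Int) (q : Int × Int)
    (hp : p ∈ PySem.List.enumerate maze 0) (hq : q ∈ PySem.List.enumerate p.2 0)
    (h0 : q.2 = 0) : pvOpen maze p.1 q.1 = true := by
  rw [PySem.List.mem_enumerate_iff] at hp
  obtain ⟨k, hk, hpe⟩ := hp
  subst hpe
  rw [PySem.List.mem_enumerate_iff] at hq
  obtain ⟨j, hj, hqe⟩ := hq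
  subst hqe
  simp only [zero_add] at h0 ⊢
  have h1 : PySem.List.pyGetD maze (k : Int) [] = maze[k] := by
    rw [PySem.List.pyGetD_of_nonneg _ _ (Int.natCast_nonneg k)]
    rw [Int.toNat_natCast]
    exact List.getD_eq_getElem _ _ hk
  have h2 : PySem.List.pyGetD maze[k] (j : Int) 0 = maze[k][j] := by
    rw [PySem.List.pyGetD_of_nonneg _ _ (Int.natCast_nonneg j)]
    rw [Int.toNat_natCast]
    exact List.getD_eq_getElem _ _ hj
  simp only [pvOpen, h1, h2, h0, Bool.and_eq_true, decide_eq_true_eq, beq_self_eq_true,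
    and_true]
  refine ⟨⟨⟨Int.natCast_nonneg k, ?_⟩, Int.natCast_nonneg j⟩, ?_⟩
  · exact_mod_cast hk
  · exact_mod_cast hj

lemma pvOpen_enum_ex (maze : List (List Int)) (x y : Int) (h : pvOpen maze x y = true) :
    ∃ p ∈ PySem.List.enumerate maze 0, ∃ q ∈ PySem.List.enumerate p.2 0,
      p.1 = x ∧ q.1 = y ∧ q.2 = 0 := by
  simp only [pvOpen, Bool.and_eq_true, decide_eq_true_eq, beq_iff_eq] at h
  obtain ⟨⟨⟨⟨hx0, hxl⟩, hy0⟩, hyl⟩, hv⟩ := h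
  have hxn : x.toNat < maze.length := by omega
  have hrow : PySem.List.pyGetD maze x [] = maze[x.toNat] := by
    rw [PySem.List.pyGetD_of_nonneg _ _ hx0]
    exact List.getD_eq_getElem _ _ hxn
  rw [hrow] at hyl hv
  have hyn : y.toNat < maze[x.toNat].length := by omega
  have hcell : PySem.List.pyGetD maze[x.toNat] y 0 = maze[x.toNat][y.toNat] := by
    rw [PySem.List.pyGetD_of_nonneg _ _ hy0]
    exact List.getD_eq_getElem _ _ hyn
  rw [hcell] at hv
  refine ⟨((x.toNat : Int), maze[x.toNat]), ?_, ((y.toNat : Int), maze[x.toNat][y.toNat]), ?_,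
    ?_, ?_, hv⟩
  · rw [PySem.List.mem_enumerate_iff]
    exact ⟨x.toNat, hxn, by rw [zero_add]⟩
  · rw [PySem.List.mem_enumerate_iff]
    exact ⟨y.toNat, hyn, by rw [zero_add]⟩
  · exact Int.toNat_of_nonneg hx0
  · exact Int.toNat_of_nonneg hy0

lemma pvSweepCell_mono (st : PySem.Set (Int × Int) × Bool) (x y cell : Int) (e : Int × Int)
    (he : e ∈ st.1) : e ∈ (pvSweepCell st x y cell).1 := by
  unfold pvSweepCell
  split
  · exact (PySem.Set.mem_add _ _ _).mpr (Or.inl he)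
  · exact he

lemma pvSweep_mono (maze : List (List Int)) (R : PySem.Set (Int × Int)) (e : Int × Int)
    (he : e ∈ R) : e ∈ (pvSweep maze R).1 := by
  unfold pvSweep
  refine pvFoldlRel (fun a b => ∀ e', e' ∈ a.1 → e' ∈ b.1)
    (fun a e' h' => h') (fun a b c h1 h2 e' h' => h2 e' (h1 e' h'))
    _ _ ?_ (R, false) e he
  intro st p _
  exact pvFoldlRel (fun a b => ∀ e', e' ∈ a.1 → e' ∈ b.1)
    (fun a e' h' => h') (fun a b c h1 h2 e' h' => h2 e' (h1 e' h'))
    (fun st2 (q : Int × Int) => pvSweepCell st2 p.1 q.1 q.2) (PySem.List.enumerate p.2 0)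
    (fun st2 q _ e' h' => pvSweepCell_mono st2 p.1 q.1 q.2 e' h') st

lemma pvReach_of_nbr (maze : List (List Int)) (s : Int × Int) (R : PySem.Set (Int × Int))
    (x y : Int) (hInv : ∀ e ∈ R, pvReach maze s e) (hnbr : pvNbr R x y = true)
    (ho : pvOpen maze x y = true) : pvReach maze s (x, y) := by
  unfold pvNbr at hnbr
  simp only [Bool.or_eq_true] at hnbr
  rcases hnbr with ((h | h) | h) | h
  · have hr := hInv _ ((PySem.Set.contains_iff _ _).mp h)
    have := pvReach.step (x - 1, y) (1, 0) hr (by simp [pvDirs])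
      (by simpa using ho)
    simpa using this
  · have hr := hInv _ ((PySem.Set.contains_iff _ _).mp h)
    have := pvReach.step (x + 1, y) (-1, 0) hr (by simp [pvDirs])
      (by simpa using ho)
    simpa using this
  · have hr := hInv _ ((PySem.Set.contains_iff _ _).mp h)
    have := pvReach.step (x, y - 1) (0, 1) hr (by simp [pvDirs])
      (by simpa using ho)
    simpa using this
  · have hr := hInv _ ((PySem.Set.contains_iff _ _).mp h)
    have := pvReach.step (x, y + 1) (0, -1) hr (by simp [pvDirs])
      (by simpa using ho)
    simpa using this

lemma pvSweepCell_sound (maze : List (List Int)) (s : Int × Int)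
    (st : PySem.Set (Int × Int) × Bool) (x y cell : Int)
    (hopen : cell = 0 → pvOpen maze x y = true)
    (hInv : ∀ e ∈ st.1, pvReach maze s e) :
    ∀ e ∈ (pvSweepCell st x y cell).1, pvReach maze s e := by
  unfold pvSweepCell
  split
  · rename_i hg
    simp only [Bool.and_eq_true, beq_iff_eq] at hg
    intro e he
    rcases (PySem.Set.mem_add _ _ _).mp he with h | h
    · exact hInv e h
    · subst h
      exact pvReach_of_nbr maze s st.1 x y hInv hg.2 (hopen hg.1.1)
  · exact hInv

lemma pvSweep_sound (maze : List (List Int)) (s : Int × Int) (R : PySem.Set (Int × Int))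
    (hInv : ∀ e ∈ R, pvReach maze s e) :
    ∀ e ∈ (pvSweep maze R).1, pvReach maze s e := by
  unfold pvSweep
  refine pvFoldlRel
    (fun a b => (∀ e ∈ a.1, pvReach maze s e) → ∀ e ∈ b.1, pvReach maze s e)
    (fun a h' => h') (fun a b c h1 h2 h' => h2 (h1 h'))
    (fun st (p : Int × List Int) => (PySem.List.enumerate p.2 0).foldl
      (fun st2 q => pvSweepCell st2 p.1 q.1 q.2) st)
    (PySem.List.enumerate maze 0) ?_ (R, false) hInv
  intro st p hp
  refine pvFoldlRel
    (fun a b => (∀ e ∈ a.1, pvReach maze s e) → ∀ e ∈ b.1, pvReach maze s e)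
    (fun a h' => h') (fun a b c h1 h2 h' => h2 (h1 h'))
    (fun st2 (q : Int × Int) => pvSweepCell st2 p.1 q.1 q.2)
    (PySem.List.enumerate p.2 0) ?_ st
  intro st2 q hq h'
  exact pvSweepCell_sound maze s st2 p.1 q.1 q.2
    (fun h0 => pvEnumOpen maze p q hp hq h0) h'

-- after a sweep that reports no change, nothing was addable
lemma pvSweepCell_nochange (st : PySem.Set (Int × Int) × Bool) (x y cell : Int)
    (h : (pvSweepCell st x y cell).2 = false) :
    pvSweepCell st x y cell = st ∧
      (cell == 0 && !(PySem.Set.contains st.1 (x, y)) && pvNbr st.1 x y) = false := by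
  unfold pvSweepCell at h ⊢
  cases hg : (cell == 0 && !(PySem.Set.contains st.1 (x, y)) && pvNbr st.1 x y)
  · exact ⟨by simp, rfl⟩
  · rw [if_pos hg] at h
    cases h

lemma pvInner_nochange (x : Int) (l : List (Int × Int)) (st : PySem.Set (Int × Int) × Bool)
    (h : (l.foldl (fun st2 q => pvSweepCell st2 x q.1 q.2) st).2 = false) :
    l.foldl (fun st2 q => pvSweepCell st2 x q.1 q.2) st = st ∧
      ∀ q ∈ l, (q.2 == 0 && !(PySem.Set.contains st.1 (x, q.1)) && pvNbr st.1 x q.1) = false := by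
  induction l generalizing st with
  | nil => exact ⟨rfl, by intro q hq; cases hq⟩
  | cons q t ih =>
    simp only [List.foldl_cons] at h ⊢
    obtain ⟨heq, hall⟩ := ih (pvSweepCell st x q.1 q.2) h
    have h2 : (pvSweepCell st x q.1 q.2).2 = false := by rw [heq] at h; exact h
    obtain ⟨hceq, hguard⟩ := pvSweepCell_nochange st x q.1 q.2 h2
    rw [hceq] at hall
    refine ⟨heq.trans hceq, ?_⟩
    intro q' hq'
    rcases List.mem_cons.mp hq' with h' | h'
    · subst h'; exact hguard
    · exact hall q' h'

lemma pvSweep_nochange (maze : List (List Int)) (R : PySem.Set (Int × Int))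
    (h : (pvSweep maze R).2 = false) :
    (pvSweep maze R).1 = R ∧
      ∀ p ∈ PySem.List.enumerate maze 0, ∀ q ∈ PySem.List.enumerate p.2 0,
        (q.2 == 0 && !(PySem.Set.contains R (p.1, q.1)) && pvNbr R p.1 q.1) = false := by
  unfold pvSweep at *
  suffices hgen : ∀ (l : List (Int × List Int)) (st : PySem.Set (Int × Int) × Bool),
      (l.foldl (fun st p => (PySem.List.enumerate p.2 0).foldl
        (fun st2 q => pvSweepCell st2 p.1 q.1 q.2) st) st).2 = false →
      l.foldl (fun st p => (PySem.List.enumerate p.2 0).foldl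
        (fun st2 q => pvSweepCell st2 p.1 q.1 q.2) st) st = st ∧
      ∀ p ∈ l, ∀ q ∈ PySem.List.enumerate p.2 0,
        (q.2 == 0 && !(PySem.Set.contains st.1 (p.1, q.1)) && pvNbr st.1 p.1 q.1) = false by
    obtain ⟨heq, hall⟩ := hgen (PySem.List.enumerate maze 0) (R, false) h
    rw [heq]
    exact ⟨rfl, hall⟩
  intro l
  induction l with
  | nil => exact fun st _ => ⟨rfl, by intro p hp; cases hp⟩
  | cons p t ih =>
    intro st h
    simp only [List.foldl_cons] at h ⊢
    set st1 := (PySem.List.enumerate p.2 0).foldl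
      (fun st2 q => pvSweepCell st2 p.1 q.1 q.2) st with hst1
    obtain ⟨heq, hall⟩ := ih st1 h
    have h2 : st1.2 = false := by rw [heq] at h; exact h
    rw [hst1] at h2
    obtain ⟨hieq, higuard⟩ := pvInner_nochange p.1 (PySem.List.enumerate p.2 0) st h2
    have hst : st1 = st := by rw [hst1]; exact hieq
    rw [hst] at hall heq ⊢
    refine ⟨heq, ?_⟩
    intro p' hp'
    rcases List.mem_cons.mp hp' with h' | h'
    · subst h'; exact higuard
    · exact hall p' h'

-- B's closure property of the fixed point
def pvClosedB (maze : List (List Int)) (R : PySem.Set (Int × Int)) : Prop :=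
  ∀ x y : Int, pvOpen maze x y = true → (x, y) ∉ R → pvNbr R x y = false

lemma pvLoopB_eq (maze : List (List Int)) (R : PySem.Set (Int × Int)) :
    pvLoopB maze R = if (pvSweep maze R).2 = true then pvLoopB maze (pvSweep maze R).1
      else (pvSweep maze R).1 := by
  rw [pvLoopB]
  simp

lemma pvLoopB_mono (maze : List (List Int)) (R : PySem.Set (Int × Int)) (e : Int × Int) :
    e ∈ R → e ∈ pvLoopB maze R := by
  induction R using pvLoopB.induct maze with
  | case1 R st hcond ih =>
    intro he
    rw [pvLoopB_eq, if_pos hcond]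
    exact ih (pvSweep_mono maze R e he)
  | case2 R st hcond =>
    intro he
    rw [pvLoopB_eq, if_neg hcond]
    exact pvSweep_mono maze R e he

lemma pvLoopB_sound (maze : List (List Int)) (s : Int × Int) (R : PySem.Set (Int × Int)) :
    (∀ e ∈ R, pvReach maze s e) → ∀ e ∈ pvLoopB maze R, pvReach maze s e := by
  induction R using pvLoopB.induct maze with
  | case1 R st hcond ih =>
    intro hInv
    rw [pvLoopB_eq, if_pos hcond]
    exact ih (pvSweep_sound maze s R hInv)
  | case2 R st hcond =>
    intro hInv
    rw [pvLoopB_eq, if_neg hcond]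
    exact pvSweep_sound maze s R hInv

lemma pvLoopB_closed (maze : List (List Int)) (R : PySem.Set (Int × Int)) :
    pvClosedB maze (pvLoopB maze R) := by
  induction R using pvLoopB.induct maze with
  | case1 R st hcond ih =>
    rw [pvLoopB_eq, if_pos hcond]
    exact ih
  | case2 R st hcond =>
    rw [pvLoopB_eq, if_neg hcond]
    have hfalse : (pvSweep maze R).2 = false := by
      revert hcond; cases (pvSweep maze R).2 <;> simp
    obtain ⟨heq, hall⟩ := pvSweep_nochange maze R hfalse
    rw [heq]
    intro x y ho hnot
    obtain ⟨p, hp, q, hq, hpx, hqy, hq0⟩ := pvOpen_enum_ex maze x y ho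
    have hg := hall p hp q hq
    rw [hpx, hqy, hq0] at hg
    have hc : PySem.Set.contains R (x, y) = false := by
      cases hcontains : PySem.Set.contains R (x, y)
      · rfl
      · exact absurd ((PySem.Set.contains_iff _ _).mp hcontains) hnot
    simpa [hc, hnot] using hg

lemma pvB_iff (maze : List (List Int)) (s e : Int × Int) :
    e ∈ pvLoopB maze (PySem.Set.add PySem.Set.empty s) ↔ pvReach maze s e := by
  constructor
  · intro he
    refine pvLoopB_sound maze s _ ?_ e he
    intro e' he'
    rw [pvInit_mem s e' he']
    exact pvReach.start
  · intro hr
    have hcl := pvLoopB_closed maze (PySem.Set.add PySem.Set.empty s)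
    have hs : s ∈ pvLoopB maze (PySem.Set.add PySem.Set.empty s) :=
      pvLoopB_mono maze _ s (pvStart_mem s)
    induction hr with
    | start => exact hs
    | step c d hc hd ho ihc =>
      by_contra hnot
      have hnbr := hcl (c.1 + d.1) (c.2 + d.2) ho hnot
      unfold pvNbr at hnbr
      simp only [Bool.or_eq_false_iff] at hnbr
      have hcc : PySem.Set.contains (pvLoopB maze (PySem.Set.add PySem.Set.empty s)) c = true :=
        (PySem.Set.contains_iff _ _).mpr ihc
      simp only [pvDirs, List.mem_cons, List.not_mem_nil, or_false] at hd
      rcases hd with h | h | h | h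
      · -- d = (0, -1): c = (x, y + 1)
        subst h
        have : (c.1 + 0, c.2 + -1 + 1) = c := Prod.ext_iff.mpr ⟨by ring, by ring⟩
        rw [this] at hnbr
        rw [hcc] at hnbr
        exact absurd hnbr.2 (by simp)
      · subst h
        have : (c.1 + 1 - 1, c.2 + 0) = c := Prod.ext_iff.mpr ⟨by ring, by ring⟩
        rw [this] at hnbr
        rw [hcc] at hnbr
        exact absurd hnbr.1.1.1 (by simp)
      · subst h
        have : (c.1 + 0, c.2 + 1 - 1) = c := Prod.ext_iff.mpr ⟨by ring, by ring⟩
        rw [this] at hnbr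
        rw [hcc] at hnbr
        exact absurd hnbr.1.2 (by simp)
      · subst h
        have : (c.1 + -1 + 1, c.2 + 0) = c := Prod.ext_iff.mpr ⟨by ring, by ring⟩
        rw [this] at hnbr
        rw [hcc] at hnbr
        exact absurd hnbr.1.1.2 (by simp)

-- ---- the two sets have the same members, hence the repairs coincide ----

lemma pvMember_eq (maze : List (List Int)) (start : Int × Int) (c : Int × Int) :
    PySem.Set.contains (pvReachableCells maze start) c =
      PySem.Set.contains (pvLoopB maze (PySem.Set.add PySem.Set.empty start)) c := by
  have hiff : c ∈ pvReachableCells maze start ↔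
      c ∈ pvLoopB maze (PySem.Set.add PySem.Set.empty start) := by
    rw [pvA_iff, pvB_iff]
  cases h1 : PySem.Set.contains (pvReachableCells maze start) c
  · cases h2 : PySem.Set.contains (pvLoopB maze (PySem.Set.add PySem.Set.empty start)) c
    · rfl
    · have := (PySem.Set.contains_iff _ _).mpr (hiff.mpr ((PySem.Set.contains_iff _ _).mp h2))
      rw [h1] at this
      cases this
  · exact ((PySem.Set.contains_iff _ _).mpr (hiff.mp ((PySem.Set.contains_iff _ _).mp h1))).symm

lemma pvRepair_congr (maze0 : List (List Int)) (R1 R2 : PySem.Set (Int × Int))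
    (h : ∀ c, PySem.Set.contains R1 c = PySem.Set.contains R2 c) :
    pvRepair maze0 R1 = pvRepair maze0 R2 := by
  unfold pvRepair
  congr 1
  funext st x
  congr 1
  funext st2 y
  rw [h (x, y)]

theorem pv_main (maze : List (List Int)) (start : Int × Int) :
    repair_unreachable_cells maze start = repair_unreachable_cells_alt maze start := by
  unfold repair_unreachable_cells repair_unreachable_cells_alt
  exact pvRepair_congr maze _ _ (pvMember_eq maze start)

-- ===== VERDICT (by name: the statement is the Claim_ definition above) =====
theorem repair_unreachable_cells_spec : Claim_equal_repair_unreachable_cells := by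
  intro maze start _
  exact pv_main maze start
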